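-- pv_equiv track=rewrite | github.com/tuvshinzaya18/tuvshinzaya18.github.io | scripts/insertTo.py | insertToTextString
-- ===== SOURCE A (Python) =====
-- def insertToTextString(entryPoint: str,source: str,insert: str) -> str:
--     start:str = ""
--     end:str = ""
--     mid:str = ""
--     lines: list[str] = source.split("\n")
--     i:int = 0
--     while "{{" + entryPoint + "}}" not in lines[i]:
--         i = i + 1
--         if i >= len(lines):
--             break
--     if i == len(lines):
--         return "no place to insert"
--     start = '\n'.join(lines[:i])
--     if i >= len(lines) - 1:
--         end = ""
--     else:
--         end = '\n'.join(lines[i+1:])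
--     mid = insert
--     return start + '\n' + mid + '\n' + end
-- ===== SOURCE B (Python) =====
-- def insertToTextString(entryPoint: str, source: str, insert: str) -> str:
--     marker = "{{" + entryPoint + "}}"
--     pos = source.find(marker)
--     if pos == -1:
--         return "no place to insert"
--     line_start = source.rfind("\n", 0, pos) + 1
--     line_end = source.find("\n", pos)
--     start = source[:line_start - 1] if line_start > 0 else ""
--     end = source[line_end + 1:] if line_end != -1 else ""
--     return start + "\n" + insert + "\n" + end
-- ===== Notes on version B (the rewrite author's own statement) =====
-- stated objective: alternative
-- what changed: B drops the split-into-lines list and the index while-loop entirely: it searches the raw string once with find, locates the enclosing line with rfind/find of the newline around the hit, and rebuilds the result from two slices of the raw source.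
-- outside the precondition, e.g. on insertToTextString('a\nb', '{{a\nb}}', 'X'): A returns 'no place to insert', B returns '\nX\nb}}'
import Mathlib
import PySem

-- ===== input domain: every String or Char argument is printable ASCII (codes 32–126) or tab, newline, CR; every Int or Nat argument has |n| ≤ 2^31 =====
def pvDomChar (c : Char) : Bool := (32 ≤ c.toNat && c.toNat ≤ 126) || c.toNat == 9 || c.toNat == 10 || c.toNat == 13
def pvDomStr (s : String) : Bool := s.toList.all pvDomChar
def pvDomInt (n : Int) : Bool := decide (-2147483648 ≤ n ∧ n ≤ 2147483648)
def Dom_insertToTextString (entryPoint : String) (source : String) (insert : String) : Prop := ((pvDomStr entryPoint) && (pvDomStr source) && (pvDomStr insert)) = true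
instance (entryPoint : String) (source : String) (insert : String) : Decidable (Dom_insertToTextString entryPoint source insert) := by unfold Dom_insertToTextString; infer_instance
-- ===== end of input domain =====

-- B replaces A's split-into-lines list and index while-loop by a single raw-string search
-- (find the marker, then rfind/find the newlines around the hit and splice two slices): alternative, same cost.

-- shared helper: the marker "{{" + entryPoint + "}}" both Pythons build
def pvMarker (entryPoint : String) : List Char := "{{".toList ++ entryPoint.toList ++ "}}".toList

-- ===== PORT A =====
-- the while loop of A: advance i until lines[i] contains the marker or i = len(lines)
def pvFindLine (marker : List Char) (lines : List (List Char)) (i : Nat) : Nat :=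
  if h : i < lines.length then
    if PySem.Chars.isIn marker lines[i] then i else pvFindLine marker lines (i + 1)
  else i
termination_by lines.length - i
decreasing_by omega

def insertToTextString (entryPoint : String) (source : String) (insert : String) : String :=
  let marker := pvMarker entryPoint
  let lines := PySem.Chars.splitOn source.toList ['\n']
  let i := pvFindLine marker lines 0
  if i = lines.length then "no place to insert"
  else
    let start := PySem.Chars.join ['\n'] (PySem.List.slice lines none (some (i : Int)))
    let endPart := if (lines.length : Int) - 1 ≤ (i : Int) then ([] : List Char)
      else PySem.Chars.join ['\n'] (PySem.List.slice lines (some ((i : Int) + 1)) none)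
    String.ofList (start ++ '\n' :: insert.toList ++ '\n' :: endPart)

-- ===== PORT B =====
def insertToTextString_alt (entryPoint : String) (source : String) (insert : String) : String :=
  let marker := pvMarker entryPoint
  let src := source.toList
  let pos := PySem.Chars.find src marker
  if pos = -1 then "no place to insert"
  else
    let lineStart := PySem.Chars.rfindFrom src ['\n'] 0 (some pos) + 1
    let lineEnd := PySem.Chars.findFrom src ['\n'] pos
    let start := if 0 < lineStart then PySem.List.slice src none (some (lineStart - 1)) else []
    let endPart := if lineEnd ≠ -1 then PySem.List.slice src (some (lineEnd + 1)) none else []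
    String.ofList (start ++ '\n' :: insert.toList ++ '\n' :: endPart)

-- ===== PRECONDITION & SPEC =====
-- Pre_ excludes only inputs whose entryPoint contains a newline while the marker "{{entryPoint}}" still
-- occurs verbatim in source: there the marker can never lie inside one line, so A's per-line search says
-- "no place to insert" while B's raw search splices across lines — an unspecifiable corner, both defensible.
def Pre_insertToTextString (entryPoint : String) (source : String) (insert : String) : Prop :=
  PySem.Chars.isIn ['\n'] entryPoint.toList = false ∨ PySem.Chars.isIn (pvMarker entryPoint) source.toList = false
instance (entryPoint : String) (source : String) (insert : String) : Decidable (Pre_insertToTextString entryPoint source insert) := by unfold Pre_insertToTextString; infer_instance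

def pvWitness_insertToTextString : String × String × String := ("x", "a\n{{x}}\nb", "INS")

def Spec_insertToTextString (entryPoint : String) (source : String) (insert : String) (out : String) : Prop := out = insertToTextString_alt entryPoint source insert
instance (entryPoint : String) (source : String) (insert : String) (out : String) : Decidable (Spec_insertToTextString entryPoint source insert out) := by unfold Spec_insertToTextString; infer_instance

-- ===== CLAIM (what is proved, stated in full; the proofs are below) =====
def Claim_equal_insertToTextString : Prop := ∀ (entryPoint : String) (source : String) (insert : String), Dom_insertToTextString entryPoint source insert → Pre_insertToTextString entryPoint source insert → Spec_insertToTextString entryPoint source insert (insertToTextString entryPoint source insert)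

-- ===== LEMMAS AND PROOFS =====

-- the common reference value: result described over the list of lines (none = marker in no line)
def pvRef (M ins : List Char) : List (List Char) → Option (List Char)
  | [] => none
  | l :: L' =>
    if PySem.Chars.isIn M l then some ('\n' :: (ins ++ '\n' :: List.intercalate ['\n'] L'))
    else
      match pvRef M ins L' with
      | none => none
      | some t => some (if PySem.Chars.isIn M L'.headI then l ++ t else l ++ '\n' :: t)

def pvOut : Option (List Char) → String
  | none => "no place to insert"
  | some t => String.ofList t

-- proof-side line splitter (structural twin of source.split("\n"))
def pvSplit : List Char → List (List Char)
  | [] => [[]]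
  | c :: r =>
    if c = '\n' then [] :: pvSplit r
    else
      match pvSplit r with
      | [] => [[c]]
      | x :: xs => (c :: x) :: xs

-- ---------- generic list/string facts ----------

lemma pv_le_or_lt (a b : Nat) : a ≤ b ∨ b < a := by omega

lemma pv_single_prefix_iff {c : Char} {w : List Char} : [c] <+: w ↔ w.head? = some c := by
  cases w with
  | nil => simp
  | cons a t =>
    constructor
    · rintro ⟨u, hu⟩; simp at hu; simp [hu.1]
    · intro h; simp at h; exact ⟨t, by simp [h]⟩

lemma pv_single_infix_iff {c : Char} {w : List Char} : [c] <:+: w ↔ c ∈ w := by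
  constructor
  · intro h; exact h.subset (by simp)
  · intro h
    obtain ⟨u, v, huv⟩ := List.append_of_mem h
    exact ⟨u, v, by simp [huv]⟩

lemma pv_drop_big {α : Type} (u v : List α) (j : Nat) (h : u.length ≤ j) :
    (u ++ v).drop j = v.drop (j - u.length) := by
  rw [List.drop_append, List.drop_eq_nil_of_le h, List.nil_append]

lemma pv_take_big {α : Type} (u v : List α) (j : Nat) (h : u.length ≤ j) :
    (u ++ v).take j = u ++ v.take (j - u.length) := by
  rw [List.take_append, List.take_of_length_le h]

lemma pv_prefix_through_sep {M u v : List Char} {c : Char} (hc : c ∉ M)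
    (h : M <+: u ++ c :: v) : M <+: u := by
  rcases pv_le_or_lt M.length u.length with hle | hlt
  · have := (List.prefix_iff_eq_take).1 h
    rw [List.take_append_of_le_length hle] at this
    exact this ▸ List.take_prefix _ _
  · exfalso
    have hlen : M.length ≤ (u ++ c :: v).length := h.length_le
    have hu : u.length < (u ++ c :: v).length := by simp
    have hg : M[u.length]'hlt = (u ++ c :: v)[u.length]'hu := h.getElem hlt
    have : (u ++ c :: v)[u.length]'hu = c := by
      rw [List.getElem_append_right (Nat.le_refl _)]
      simp
    exact hc (by rw [← this, ← hg]; exact List.getElem_mem _)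

-- find s M = k whenever M is a prefix at k and at no earlier index
lemma pv_find_eq {s M : List Char} {k : Nat} (h1 : M <+: s.drop k)
    (h2 : ∀ j < k, ¬ M <+: s.drop j) : PySem.Chars.find s M = k := by
  have hinf : M <:+: s :=
    (PySem.Chars.isIn_iff_infix M s).1 ((PySem.Chars.exists_prefix_drop_iff_isIn M s).1 ⟨k, h1⟩)
  have hnn : 0 ≤ PySem.Chars.find s M := (PySem.Chars.find_nonneg_iff s M).2 hinf
  obtain ⟨hp, hmin⟩ := PySem.Chars.find_spec (s := s) (sub := M) hnn
  rcases Nat.lt_trichotomy (PySem.Chars.find s M).toNat k with h | h | h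
  · exact absurd hp (h2 _ h)
  · omega
  · exact absurd h1 (hmin k h)

lemma pv_isIn_false_find {s M : List Char} (h : PySem.Chars.isIn M s = false) :
    PySem.Chars.find s M = -1 := by
  have := PySem.Chars.isIn_eq_false_iff M s |>.1 h
  exact (PySem.Chars.find_eq_neg_one_iff s M).2 this

lemma pv_isIn_true_find {s M : List Char} (h : PySem.Chars.isIn M s = true) :
    PySem.Chars.find s M ≠ -1 := by
  have := PySem.Chars.isIn_iff_infix M s |>.1 h
  exact (PySem.Chars.find_ne_neg_one_iff s M).2 this

lemma pv_find_append_left {M u v : List Char} (hM : '\n' ∉ M)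
    (hu : PySem.Chars.isIn M u = true) :
    PySem.Chars.find (u ++ '\n' :: v) M = PySem.Chars.find u M := by
  have hinf := (PySem.Chars.isIn_iff_infix M u).1 hu
  have hnn : 0 ≤ PySem.Chars.find u M := (PySem.Chars.find_nonneg_iff u M).2 hinf
  obtain ⟨hp, hmin⟩ := PySem.Chars.find_spec (s := u) (sub := M) hnn
  set k := (PySem.Chars.find u M).toNat with hk
  have hkle : k ≤ u.length := by
    have := PySem.Chars.find_le_length u M; omega
  have h1 : M <+: (u ++ '\n' :: v).drop k := by
    rw [List.drop_append_of_le_length hkle]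
    exact hp.trans (List.prefix_append _ _)
  have h2 : ∀ j < k, ¬ M <+: (u ++ '\n' :: v).drop j := by
    intro j hj hpre
    have hjle : j ≤ u.length := by omega
    rw [List.drop_append_of_le_length hjle] at hpre
    exact hmin j hj (pv_prefix_through_sep hM hpre)
  have := pv_find_eq h1 h2
  rw [this, hk, Int.toNat_of_nonneg hnn]

lemma pv_infix_of_prefix_drop {M u : List Char} {j : Nat} (h : M <+: u.drop j) : M <:+: u :=
  h.isInfix.trans (u.drop_suffix j).isInfix

lemma pv_find_append_right {M u v : List Char} (hM : '\n' ∉ M)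
    (hu : PySem.Chars.isIn M u = false) :
    PySem.Chars.find (u ++ '\n' :: v) M =
      if PySem.Chars.find v M = -1 then -1 else (u.length : Int) + 1 + PySem.Chars.find v M := by
  have hnotu : ¬ M <:+: u := (PySem.Chars.isIn_eq_false_iff M u).1 hu
  have hdropgt : ∀ j : Nat, u.length < j → (u ++ '\n' :: v).drop j = v.drop (j - u.length - 1) := by
    intro j hj
    have h2 : u ++ '\n' :: v = (u ++ ['\n']) ++ v := by simp
    rw [h2, pv_drop_big _ _ _ (by simp only [List.length_append, List.length_cons, List.length_nil]; omega)]
    congr 1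
    simp only [List.length_append, List.length_cons, List.length_nil]
    omega
  have hdrople : ∀ j : Nat, j ≤ u.length → (u ++ '\n' :: v).drop j = u.drop j ++ '\n' :: v :=
    fun j hj => List.drop_append_of_le_length hj
  by_cases hv : PySem.Chars.find v M = -1
  · rw [if_pos hv]
    have hnotv : ¬ M <:+: v := (PySem.Chars.find_eq_neg_one_iff v M).1 hv
    apply (PySem.Chars.find_eq_neg_one_iff _ M).2
    intro hinf
    obtain ⟨j, hj⟩ := (PySem.Chars.exists_prefix_drop_iff_isIn M (u ++ '\n' :: v)).2
      ((PySem.Chars.isIn_iff_infix M _).2 hinf)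
    rcases pv_le_or_lt j u.length with hle | hlt
    · rw [hdrople j hle] at hj
      exact hnotu (pv_infix_of_prefix_drop (pv_prefix_through_sep hM hj))
    · rw [hdropgt j hlt] at hj
      exact hnotv (pv_infix_of_prefix_drop hj)
  · rw [if_neg hv]
    have hvnn : 0 ≤ PySem.Chars.find v M := by
      have := PySem.Chars.neg_one_le_find v M; omega
    obtain ⟨hp, hmin⟩ := PySem.Chars.find_spec (s := v) (sub := M) hvnn
    set k := (PySem.Chars.find v M).toNat with hk
    have h1 : M <+: (u ++ '\n' :: v).drop (u.length + 1 + k) := by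
      rw [hdropgt _ (by omega)]
      have : u.length + 1 + k - u.length - 1 = k := by omega
      rw [this]; exact hp
    have h2 : ∀ j < u.length + 1 + k, ¬ M <+: (u ++ '\n' :: v).drop j := by
      intro j hj hpre
      rcases pv_le_or_lt j u.length with hle | hlt
      · rw [hdrople j hle] at hpre
        exact hnotu (pv_infix_of_prefix_drop (pv_prefix_through_sep hM hpre))
      · rw [hdropgt j hlt] at hpre
        exact hmin (j - u.length - 1) (by omega) hpre
    have := pv_find_eq h1 h2
    rw [this]
    push_cast
    omega

-- rfind.go facts
lemma pv_rfind_go_none {s sub : List Char} :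
    ∀ j, (∀ i, i ≤ j → ¬ sub <+: s.drop i) → PySem.Chars.rfind.go s sub j = -1 := by
  intro j
  induction j with
  | zero =>
    intro h
    rw [PySem.Chars.rfind.go]
    rw [if_neg (fun hp => h 0 (Nat.le_refl _) (by simpa using List.isPrefixOf_iff_prefix.1 hp))]
  | succ j ih =>
    intro h
    rw [PySem.Chars.rfind.go]
    rw [if_neg (fun hp => h (j + 1) (Nat.le_refl _) (List.isPrefixOf_iff_prefix.1 hp))]
    exact ih (fun i hi => h i (Nat.le_succ_of_le hi))

lemma pv_rfind_go_eq {s sub : List Char} {k : Nat} (hp : sub <+: s.drop k) :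
    ∀ j, k ≤ j → (∀ i, k < i → i ≤ j → ¬ sub <+: s.drop i) →
      PySem.Chars.rfind.go s sub j = k := by
  intro j
  induction j with
  | zero =>
    intro hk _
    have hk0 : k = 0 := by omega
    subst hk0
    rw [PySem.Chars.rfind.go]
    rw [if_pos (List.isPrefixOf_iff_prefix.2 (by simpa using hp))]
    rfl
  | succ j ih =>
    intro hk h
    rcases Nat.lt_or_ge k (j + 1) with hlt | hge
    · rw [PySem.Chars.rfind.go]
      rw [if_neg (fun hpre => h (j + 1) hlt (Nat.le_refl _) (List.isPrefixOf_iff_prefix.1 hpre))]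
      exact ih (by omega) (fun i h1 h2 => h i h1 (by omega))
    · have hkj : k = j + 1 := by omega
      subst hkj
      rw [PySem.Chars.rfind.go]
      rw [if_pos (List.isPrefixOf_iff_prefix.2 hp)]

lemma pv_rfind_go_none_sound {s sub : List Char} :
    ∀ j, PySem.Chars.rfind.go s sub j = -1 → ∀ i, i ≤ j → ¬ sub <+: s.drop i := by
  intro j
  induction j with
  | zero =>
    intro h i hi hpre
    have hi0 : i = 0 := by omega
    subst hi0
    rw [PySem.Chars.rfind.go] at h
    rw [if_pos (List.isPrefixOf_iff_prefix.2 (by simpa using hpre))] at h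
    exact absurd h (by decide)
  | succ j ih =>
    intro h i hi hpre
    rw [PySem.Chars.rfind.go] at h
    by_cases hp : sub.isPrefixOf (s.drop (j + 1))
    · rw [if_pos hp] at h; omega
    · rw [if_neg hp] at h
      rcases Nat.lt_or_ge i (j + 1) with hlt | hge
      · exact ih h i (by omega) hpre
      · have : i = j + 1 := by omega
        subst this
        exact hp (List.isPrefixOf_iff_prefix.2 hpre)

lemma pv_rfind_none_sound {t sub : List Char} (h : PySem.Chars.rfind t sub = -1) :
    ∀ i, i ≤ t.length → ¬ sub <+: t.drop i := by
  unfold PySem.Chars.rfind at h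
  exact pv_rfind_go_none_sound _ h

lemma pv_rfind_no_newline {t : List Char} (h : '\n' ∉ t) :
    PySem.Chars.rfind t ['\n'] = -1 := by
  unfold PySem.Chars.rfind
  apply pv_rfind_go_none
  intro i _ hp
  rw [pv_single_prefix_iff] at hp
  have : '\n' ∈ t.drop i := by
    cases hd : (t.drop i) with
    | nil => simp [hd] at hp
    | cons a r => rw [hd] at hp; simp at hp; simp [hp]
  exact h (List.mem_of_mem_drop this)

lemma pv_rfind_sound {t sub : List Char} (h : PySem.Chars.rfind t sub ≠ -1) :
    0 ≤ PySem.Chars.rfind t sub ∧ (PySem.Chars.rfind t sub).toNat ≤ t.length ∧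
      sub <+: t.drop (PySem.Chars.rfind t sub).toNat ∧
      ∀ i, (PySem.Chars.rfind t sub).toNat < i → i ≤ t.length → ¬ sub <+: t.drop i := by
  unfold PySem.Chars.rfind at h ⊢
  suffices H : ∀ j, PySem.Chars.rfind.go t sub j ≠ -1 →
      0 ≤ PySem.Chars.rfind.go t sub j ∧ (PySem.Chars.rfind.go t sub j).toNat ≤ j ∧
      sub <+: t.drop (PySem.Chars.rfind.go t sub j).toNat ∧
      ∀ i, (PySem.Chars.rfind.go t sub j).toNat < i → i ≤ j → ¬ sub <+: t.drop i by
    exact H t.length h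
  intro j
  induction j with
  | zero =>
    intro hne
    rw [PySem.Chars.rfind.go] at hne ⊢
    by_cases hp : sub.isPrefixOf t
    · rw [if_pos hp] at hne ⊢
      refine ⟨by norm_num, by norm_num, by simpa using List.isPrefixOf_iff_prefix.1 hp, ?_⟩
      intro i h1 h2
      simp at h1 h2
      omega
    · rw [if_neg hp] at hne; exact absurd rfl hne
  | succ j ih =>
    intro hne
    rw [PySem.Chars.rfind.go] at hne ⊢
    by_cases hp : sub.isPrefixOf (t.drop (j + 1))
    · rw [if_pos hp] at hne ⊢
      refine ⟨by positivity, by simp, by simpa using List.isPrefixOf_iff_prefix.1 hp, ?_⟩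
      intro i h1 h2
      simp at h1
      omega
    · rw [if_neg hp] at hne ⊢
      obtain ⟨a, b, c, d⟩ := ih hne
      refine ⟨a, by omega, c, ?_⟩
      intro i h1 h2
      rcases Nat.lt_or_ge i (j + 1) with hlt | hge
      · exact d i h1 (by omega)
      · have : i = j + 1 := by omega
        subst this
        exact fun hpre => hp (List.isPrefixOf_iff_prefix.2 hpre)

lemma pv_rfind_eq {t sub : List Char} {k : Nat} (hp : sub <+: t.drop k) (hk : k ≤ t.length)
    (hmax : ∀ i, k < i → i ≤ t.length → ¬ sub <+: t.drop i) :
    PySem.Chars.rfind t sub = k := by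
  unfold PySem.Chars.rfind
  exact pv_rfind_go_eq hp t.length hk hmax

lemma pv_rfind_append_newline (u v : List Char) :
    PySem.Chars.rfind (u ++ '\n' :: v) ['\n'] =
      if PySem.Chars.rfind v ['\n'] = -1 then (u.length : Int)
      else (u.length : Int) + 1 + PySem.Chars.rfind v ['\n'] := by
  have hdropgt : ∀ j : Nat, u.length < j → (u ++ '\n' :: v).drop j = v.drop (j - u.length - 1) := by
    intro j hj
    have h2 : u ++ '\n' :: v = (u ++ ['\n']) ++ v := by simp
    rw [h2, pv_drop_big _ _ _ (by simp only [List.length_append, List.length_cons, List.length_nil]; omega)]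
    congr 1
    simp only [List.length_append, List.length_cons, List.length_nil]
    omega
  by_cases hv : PySem.Chars.rfind v ['\n'] = -1
  · rw [if_pos hv]
    have hmax := pv_rfind_none_sound hv
    apply pv_rfind_eq (k := u.length)
    · rw [List.drop_append_of_le_length (Nat.le_refl _)]
      simp
    · simp
    · intro i h1 h2 hpre
      simp at h2
      rw [hdropgt i h1] at hpre
      exact hmax (i - u.length - 1) (by omega) hpre
  · obtain ⟨ha, hb, hc, hd⟩ := pv_rfind_sound hv
    rw [if_neg hv]
    set k := (PySem.Chars.rfind v ['\n']).toNat with hk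
    have hgoal : PySem.Chars.rfind (u ++ '\n' :: v) ['\n'] = ((u.length + 1 + k : Nat) : Int) := by
      apply pv_rfind_eq
      · rw [hdropgt _ (by omega)]
        have h5 : u.length + 1 + k - u.length - 1 = k := by omega
        rw [h5]; exact hc
      · simp; omega
      · intro i h1 h2 hpre
        simp at h2
        rw [hdropgt i (by omega)] at hpre
        exact hd (i - u.length - 1) (by omega) (by omega) hpre
    rw [hgoal]
    push_cast
    omega

lemma pv_rfind_mem_ne {t : List Char} (h : '\n' ∈ t) :
    PySem.Chars.rfind t ['\n'] ≠ -1 := by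
  intro hc
  obtain ⟨u, v, rfl⟩ := List.append_of_mem h
  rw [pv_rfind_append_newline] at hc
  by_cases hv : PySem.Chars.rfind v ['\n'] = -1
  · rw [if_pos hv] at hc; omega
  · rw [if_neg hv] at hc
    have := PySem.Chars.neg_one_le_find v ['\n']
    have h2 : -1 ≤ PySem.Chars.rfind v ['\n'] := by
      obtain ⟨a, _, _, _⟩ := pv_rfind_sound hv
      omega
    omega

lemma pv_rfindFrom_zero {s sub : List Char} {pos : Int} (h0 : 0 ≤ pos) (h1 : pos ≤ s.length) :
    PySem.Chars.rfindFrom s sub 0 (some pos) = PySem.Chars.rfind (s.take pos.toNat) sub := by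
  have hge : -1 ≤ PySem.Chars.rfind (s.take pos.toNat) sub := by
    by_cases h : PySem.Chars.rfind (s.take pos.toNat) sub = -1
    · omega
    · have := (pv_rfind_sound h).1
      omega
  simp [PySem.Chars.rfindFrom]
  split_ifs <;> omega

-- intercalate structure
lemma pv_intercalate_nil : List.intercalate ['\n'] ([] : List (List Char)) = [] := by
  simp [List.intercalate]

lemma pv_intercalate_cons (a : List Char) (L : List (List Char)) :
    List.intercalate ['\n'] (a :: L) =
      a ++ (if L = [] then [] else '\n' :: List.intercalate ['\n'] L) := by
  cases L with
  | nil => simp [List.intercalate]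
  | cons b L' =>
    rw [if_neg (by simp)]
    simp [List.intercalate, List.intersperse]

lemma pv_mem_infix_intercalate {l : List Char} {L : List (List Char)}
    (h : l ∈ L) : l <:+: List.intercalate ['\n'] L := by
  induction L with
  | nil => simp at h
  | cons a L' ih =>
    rw [pv_intercalate_cons]
    rcases List.mem_cons.1 h with rfl | h2
    · exact (List.prefix_append l _).isInfix
    · have hne : L' ≠ [] := List.ne_nil_of_mem h2
      rw [if_neg hne]
      exact (ih h2).trans ⟨a ++ ['\n'], [], by simp⟩

-- pvSplit facts
lemma pv_pvSplit_ne_nil (s : List Char) : pvSplit s ≠ [] := by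
  induction s with
  | nil => simp [pvSplit]
  | cons c r ih =>
    rw [pvSplit]
    by_cases h : c = '\n'
    · rw [if_pos h]; simp
    · rw [if_neg h]
      cases hs : pvSplit r with
      | nil => simp
      | cons x xs => simp

lemma pv_pvSplit_no_newline {s : List Char} (h : '\n' ∉ s) : pvSplit s = [s] := by
  induction s with
  | nil => simp [pvSplit]
  | cons c r ih =>
    have hc : ¬ c = '\n' := fun hh => h (by simp [hh])
    have hr : '\n' ∉ r := fun hh => h (by simp [hh])
    rw [pvSplit, if_neg hc, ih hr]

lemma pv_pvSplit_append {a : List Char} (b : List Char) (h : '\n' ∉ a) :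
    pvSplit (a ++ '\n' :: b) = a :: pvSplit b := by
  induction a with
  | nil => simp [pvSplit]
  | cons c a' ih =>
    have hc : ¬ c = '\n' := fun hh => h (by simp [hh])
    have ha : '\n' ∉ a' := fun hh => h (by simp [hh])
    rw [List.cons_append, pvSplit, if_neg hc, ih ha]

lemma pv_intercalate_pvSplit (s : List Char) :
    List.intercalate ['\n'] (pvSplit s) = s := by
  induction s with
  | nil => simp [pvSplit, List.intercalate]
  | cons c r ih =>
    by_cases h : c = '\n'
    · subst h
      rw [pvSplit, if_pos rfl, pv_intercalate_cons, if_neg (pv_pvSplit_ne_nil r)]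
      simp [ih]
    · rw [pvSplit, if_neg h]
      cases hs : pvSplit r with
      | nil => exact absurd hs (pv_pvSplit_ne_nil r)
      | cons x xs =>
        rw [hs] at ih
        rw [pv_intercalate_cons] at ih
        show List.intercalate ['\n'] ((c :: x) :: xs) = c :: r
        rw [pv_intercalate_cons]
        rw [← ih]
        simp

lemma pv_pvSplit_newline_free (s : List Char) : ∀ l ∈ pvSplit s, '\n' ∉ l := by
  induction s with
  | nil => simp [pvSplit]
  | cons c r ih =>
    by_cases h : c = '\n'
    · subst h
      rw [pvSplit, if_pos rfl]
      intro l hl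
      rcases List.mem_cons.1 hl with hl' | hl'
      · simp [hl']
      · exact ih l hl'
    · rw [pvSplit, if_neg h]
      cases hs : pvSplit r with
      | nil => exact absurd hs (pv_pvSplit_ne_nil r)
      | cons x xs =>
        intro l hl
        rcases List.mem_cons.1 hl with hl' | hl'
        · subst hl'
          intro hmem
          rcases List.mem_cons.1 hmem with hm | hm
          · exact h hm.symm
          · exact ih x (by rw [hs]; exact List.mem_cons_self ..) hm
        · exact ih l (by rw [hs]; exact List.mem_cons_of_mem _ hl')

-- splitOn = pvSplit
lemma pv_splitOn_go_eq : ∀ (fuel : Nat) (l cur : List Char) (acc : List (List Char)),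
    l.length < fuel → '\n' ∉ cur →
    PySem.Chars.splitOn.go ['\n'] fuel l cur acc = acc.reverse ++ pvSplit (cur.reverse ++ l) := by
  intro fuel
  induction fuel with
  | zero => intro l cur acc h; omega
  | succ f ih =>
    intro l cur acc hlen hcur
    cases l with
    | nil =>
      rw [PySem.Chars.splitOn.go]
      rw [pv_pvSplit_no_newline (by simpa using hcur)]
      simp
      simp
    | cons c rest =>
      rw [PySem.Chars.splitOn.go]
      by_cases hc : c = '\n'
      · subst hc
        rw [if_pos (by simp [List.isPrefixOf])]
        rw [show List.drop (['\n'].length) ('\n' :: rest) = rest from rfl]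
        rw [ih rest [] (cur.reverse :: acc) (by simp at hlen; omega) (by simp)]
        rw [pv_pvSplit_append rest (by simpa using hcur)]
        simp
      · rw [if_neg (by simp [List.isPrefixOf]; exact fun hh => hc hh.symm)]
        rw [ih rest (c :: cur) acc (by simp at hlen ⊢; omega)
          (by intro hm; rcases List.mem_cons.1 hm with hm | hm
              · exact hc hm.symm
              · exact hcur hm)]
        rw [show (c :: cur).reverse ++ rest = cur.reverse ++ c :: rest from by simp]

lemma pv_splitOn_eq (s : List Char) : PySem.Chars.splitOn s ['\n'] = pvSplit s := by
  unfold PySem.Chars.splitOn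
  rw [pv_splitOn_go_eq (s.length + 1) s [] [] (by omega) (by simp)]
  simp

-- pvFindLine structure
lemma pv_findLine_eq (M : List Char) (lines : List (List Char)) (i : Nat) :
    pvFindLine M lines i =
      if h : i < lines.length then
        (if PySem.Chars.isIn M lines[i] then i else pvFindLine M lines (i + 1))
      else i := by
  conv_lhs => rw [pvFindLine]

lemma pv_findLine_shift (M : List Char) (l : List Char) (ls : List (List Char)) :
    ∀ i, pvFindLine M (l :: ls) (i + 1) = pvFindLine M ls i + 1 := by
  suffices H : ∀ n i, ls.length - i = n → pvFindLine M (l :: ls) (i + 1) = pvFindLine M ls i + 1 by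
    exact fun i => H _ i rfl
  intro n
  induction n with
  | zero =>
    intro i hn
    rw [pv_findLine_eq M (l :: ls) (i + 1), pv_findLine_eq M ls i]
    rw [dif_neg (show ¬ (i + 1 < (l :: ls).length) by simp only [List.length_cons]; omega),
        dif_neg (show ¬ (i < ls.length) by omega)]
  | succ n ihn =>
    intro i hn
    rw [pv_findLine_eq M (l :: ls) (i + 1), pv_findLine_eq M ls i]
    rw [dif_pos (show i + 1 < (l :: ls).length by simp only [List.length_cons]; omega),
        dif_pos (show i < ls.length by omega)]
    simp only [List.getElem_cons_succ]
    by_cases h : PySem.Chars.isIn M ls[i]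
    · rw [if_pos h, if_pos h]
    · rw [if_neg h, if_neg h]
      exact ihn (i + 1) (by omega)

lemma pv_findLine_cons (M l : List Char) (ls : List (List Char)) :
    pvFindLine M (l :: ls) 0 = if PySem.Chars.isIn M l then 0 else pvFindLine M ls 0 + 1 := by
  rw [pv_findLine_eq M (l :: ls) 0]
  rw [dif_pos (by simp)]
  simp only [List.getElem_cons_zero]
  by_cases h : PySem.Chars.isIn M l
  · rw [if_pos h, if_pos h]
  · rw [if_neg h, if_neg h]
    exact pv_findLine_shift M l ls 0

lemma pv_findLine_nil (M : List Char) (i : Nat) : pvFindLine M [] i = i := by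
  rw [pv_findLine_eq]; simp

lemma pv_findLine_le (M : List Char) (L : List (List Char)) :
    ∀ i, i ≤ L.length → pvFindLine M L i ≤ L.length := by
  suffices H : ∀ n i, L.length - i = n → i ≤ L.length → pvFindLine M L i ≤ L.length by
    exact fun i => H _ i rfl
  intro n
  induction n with
  | zero =>
    intro i hn hi
    rw [pv_findLine_eq]
    rw [dif_neg (by omega)]
    omega
  | succ n ihn =>
    intro i hn hi
    rw [pv_findLine_eq]
    rw [dif_pos (by omega)]
    by_cases h : PySem.Chars.isIn M L[i]
    · rw [if_pos h]; omega
    · rw [if_neg h]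
      exact ihn (i + 1) (by omega) (by omega)

lemma pv_findLine_all_false {M : List Char} {L : List (List Char)} :
    pvFindLine M L 0 = L.length ↔ ∀ l ∈ L, PySem.Chars.isIn M l = false := by
  induction L with
  | nil => simp [pv_findLine_nil]
  | cons l ls ih =>
    rw [pv_findLine_cons]
    by_cases h : PySem.Chars.isIn M l
    · simp [h]
    · simp only [if_neg h, List.length_cons, Nat.add_right_cancel_iff]
      simp only [List.mem_cons]
      constructor
      · intro hh x hx
        rcases hx with hx | hx
        · subst hx; simpa using h
        · exact ih.1 hh x hx
      · intro hh
        exact ih.2 (fun x hx => hh x (Or.inr hx))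

lemma pv_ref_none_iff {M ins : List Char} {L : List (List Char)} :
    pvRef M ins L = none ↔ pvFindLine M L 0 = L.length := by
  induction L with
  | nil => simp [pvRef, pv_findLine_nil]
  | cons l ls ih =>
    rw [pv_findLine_cons, pvRef]
    by_cases h : PySem.Chars.isIn M l
    · rw [if_pos h, if_pos h]
      simp
    · rw [if_neg h, if_neg h]
      cases hr : pvRef M ins ls with
      | none =>
        have h2 := ih.1 hr
        simp [h2]
      | some t =>
        have h2 : pvFindLine M ls 0 ≠ ls.length := fun hh => by
          rw [ih.2 hh] at hr
          cases hr
        exact ⟨fun hc => absurd hc (by simp), fun hlen => absurd (Nat.add_right_cancel hlen) h2⟩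

-- String.ofList is injective
lemma pv_ofList_inj {a b : List Char} (h : String.ofList a = String.ofList b) : a = b := by
  have := congrArg String.toList h
  simpa using this

-- the A-side clean form
def pvAClean (M ins : List Char) (L : List (List Char)) : String :=
  let i := pvFindLine M L 0
  if i = L.length then "no place to insert"
  else String.ofList (List.intercalate ['\n'] (L.take i) ++ '\n' :: ins ++ '\n' ::
    (if L.length ≤ i + 1 then [] else List.intercalate ['\n'] (L.drop (i + 1))))

-- the B-side clean form (literally port B's body after marker/src)
def pvBClean (M ins src : List Char) : String :=
  let pos := PySem.Chars.find src M
  if pos = -1 then "no place to insert"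
  else
    let lineStart := PySem.Chars.rfindFrom src ['\n'] 0 (some pos) + 1
    let lineEnd := PySem.Chars.findFrom src ['\n'] pos
    let start := if 0 < lineStart then PySem.List.slice src none (some (lineStart - 1)) else []
    let endPart := if lineEnd ≠ -1 then PySem.List.slice src (some (lineEnd + 1)) none else []
    String.ofList (start ++ '\n' :: ins ++ '\n' :: endPart)

lemma pv_portB_eq (e s ins : String) :
    insertToTextString_alt e s ins = pvBClean (pvMarker e) ins.toList s.toList := rfl

lemma pv_portA_eq (e s ins : String) :
    insertToTextString e s ins = pvAClean (pvMarker e) ins.toList (pvSplit s.toList) := by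
  unfold insertToTextString pvAClean
  rw [pv_splitOn_eq]
  set L := pvSplit s.toList
  set i := pvFindLine (pvMarker e) L 0 with hi
  by_cases h : i = L.length
  · rw [if_pos h, if_pos h]
  · rw [if_neg h, if_neg h]
    have h1 : PySem.List.slice L none (some (i : Int)) = L.take i := by
      exact PySem.List.slice_to_natCast L i
    have h2 : PySem.List.slice L (some ((i : Int) + 1)) none = L.drop (i + 1) := by
      have : ((i : Int) + 1) = ((i + 1 : Nat) : Int) := by push_cast; ring
      rw [this]
      exact PySem.List.slice_from_natCast L (i + 1)
    have h3 : ((L.length : Int) - 1 ≤ (i : Int)) ↔ (L.length ≤ i + 1) := by omega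
    rw [h1]
    by_cases h4 : L.length ≤ i + 1
    · rw [if_pos (h3.2 h4), if_pos h4]
      simp [PySem.Chars.join]
    · rw [if_neg (fun hh => h4 (h3.1 hh)), if_neg h4, h2]
      simp [PySem.Chars.join]

-- ===== the two main inductions =====

lemma pv_TA (M ins : List Char) : ∀ L, pvAClean M ins L = pvOut (pvRef M ins L) := by
  intro L
  induction L with
  | nil => simp [pvAClean, pvRef, pvOut, pv_findLine_nil]
  | cons l L' ih =>
    unfold pvAClean
    simp only
    rw [pv_findLine_cons]
    by_cases h : PySem.Chars.isIn M l
    · rw [if_pos h, pvRef, if_pos h]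
      rw [if_neg (show ¬ ((0 : Nat) = (l :: L').length) by simp)]
      by_cases h2 : L' = []
      · subst h2
        simp [pvOut, pv_intercalate_nil]
      · rw [if_neg (show ¬ ((l :: L').length ≤ 0 + 1) by
          cases L' with
          | nil => exact absurd rfl h2
          | cons a b => simp)]
        simp [pvOut, pv_intercalate_nil]
    · rw [if_neg h, pvRef, if_neg h]
      cases hr : pvRef M ins L' with
      | none =>
        have hlen : pvFindLine M L' 0 = L'.length := pv_ref_none_iff.1 hr
        rw [if_pos (by simp [hlen])]
        rfl
      | some t =>
        have hne : pvFindLine M L' 0 ≠ L'.length := by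
          intro hh
          rw [pv_ref_none_iff.2 hh] at hr
          exact absurd hr (by simp)
        set i' := pvFindLine M L' 0 with hi'
        have hlt' : i' < L'.length :=
          lt_of_le_of_ne (pv_findLine_le M L' 0 (Nat.zero_le _)) hne
        rw [if_neg (show ¬ (i' + 1 = (l :: L').length) by simp; omega)]
        rw [hr] at ih
        unfold pvAClean at ih
        simp only [pvOut] at ih
        rw [if_neg hne] at ih
        have ht : t = List.intercalate ['\n'] (L'.take i') ++ '\n' :: ins ++ '\n' ::
            (if L'.length ≤ i' + 1 then [] else List.intercalate ['\n'] (L'.drop (i' + 1))) :=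
          (pv_ofList_inj ih).symm
        obtain ⟨h0, L'', rfl⟩ : ∃ h0 L'', L' = h0 :: L'' := by
          cases L' with
          | nil => simp at hlt'
          | cons a b => exact ⟨a, b, rfl⟩
        have hi0 : i' = 0 ↔ PySem.Chars.isIn M h0 = true := by
          rw [hi', pv_findLine_cons]
          by_cases hh : PySem.Chars.isIn M h0 <;> simp [hh]
        simp only [pvOut, List.headI]
        by_cases hz : PySem.Chars.isIn M h0
        · rw [if_pos hz]
          have hi0' : i' = 0 := hi0.2 hz
          rw [ht, hi0']
          by_cases hL : L'' = []
          · subst hL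
            simp [pv_intercalate_cons, pv_intercalate_nil]
          · rw [if_neg (show ¬ ((l :: h0 :: L'').length ≤ 0 + 1 + 1) by
                cases L'' with
                | nil => exact absurd rfl hL
                | cons a b => simp),
              if_neg (show ¬ ((h0 :: L'').length ≤ 0 + 1) by
                cases L'' with
                | nil => exact absurd rfl hL
                | cons a b => simp)]
            simp [pv_intercalate_cons, pv_intercalate_nil]
        · rw [if_neg hz]
          have hi0' : i' ≠ 0 := fun hh => hz (hi0.1 hh)
          obtain ⟨j, hj⟩ : ∃ j, i' = j + 1 := ⟨i' - 1, by omega⟩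
          rw [ht, hj]
          by_cases hE : (h0 :: L'').length ≤ (j + 1) + 1
          · rw [if_pos hE, if_pos (show (l :: h0 :: L'').length ≤ (j + 1 + 1) + 1 by
              simp at hE ⊢; omega)]
            simp [pv_intercalate_cons]
          · rw [if_neg hE, if_neg (show ¬ ((l :: h0 :: L'').length ≤ (j + 1 + 1) + 1) by
              simp at hE ⊢; omega)]
            simp [pv_intercalate_cons]

-- one unfolding step of the B side, in take/drop form
lemma pv_B_shape (M ins src : List Char) (hne : PySem.Chars.find src M ≠ -1) :
    pvBClean M ins src = String.ofList (
      (if PySem.Chars.rfind (src.take (PySem.Chars.find src M).toNat) ['\n'] = -1 then []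
       else src.take (PySem.Chars.rfind (src.take (PySem.Chars.find src M).toNat) ['\n']).toNat) ++
      '\n' :: ins ++ '\n' ::
      (if PySem.Chars.find (src.drop (PySem.Chars.find src M).toNat) ['\n'] = -1 then []
       else src.drop ((PySem.Chars.find src M).toNat +
         (PySem.Chars.find (src.drop (PySem.Chars.find src M).toNat) ['\n']).toNat + 1))) := by
  have hnn : 0 ≤ PySem.Chars.find src M := by
    have := PySem.Chars.neg_one_le_find src M; omega
  have hle : PySem.Chars.find src M ≤ src.length := PySem.Chars.find_le_length src M
  set k := (PySem.Chars.find src M).toNat with hk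
  have hkle : k ≤ src.length := by omega
  have hcast : PySem.Chars.find src M = (k : Int) := by omega
  simp only [pvBClean]
  rw [if_neg hne, hcast]
  rw [pv_rfindFrom_zero (by omega) (by exact_mod_cast hkle)]
  rw [show ((k : Int)).toNat = k from by omega]
  rw [PySem.Chars.findFrom_natCast src ['\n'] k hkle]
  set r := PySem.Chars.rfind (src.take k) ['\n'] with hr
  set f := PySem.Chars.find (src.drop k) ['\n'] with hf
  have hfge : -1 ≤ f := PySem.Chars.neg_one_le_find _ _
  have hrge : -1 ≤ r := by
    by_cases h : r = -1
    · omega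
    · have := (pv_rfind_sound (hr ▸ h)).1
      omega
  by_cases hrc : r = -1
  · rw [if_pos hrc]
    rw [if_neg (show ¬ ((0 : Int) < r + 1) by omega)]
    by_cases hfc : f = -1
    · rw [if_pos hfc, if_pos hfc]
      rw [if_neg (show ¬ ((-1 : Int) ≠ -1) by simp)]
    · rw [if_neg hfc, if_neg hfc]
      rw [if_pos (show ((k : Int) + f) ≠ -1 by omega)]
      rw [PySem.List.slice_from src (show (0 : Int) ≤ (k : Int) + f + 1 from by omega)]
      rw [show ((k : Int) + f + 1).toNat = k + f.toNat + 1 from by omega]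
  · rw [if_neg hrc]
    rw [if_pos (show (0 : Int) < r + 1 by omega)]
    rw [show r + 1 - 1 = r from by ring]
    rw [PySem.List.slice_to src (show (0 : Int) ≤ r from by omega)]
    by_cases hfc : f = -1
    · rw [if_pos hfc, if_pos hfc]
      rw [if_neg (show ¬ ((-1 : Int) ≠ -1) by simp)]
    · rw [if_neg hfc, if_neg hfc]
      rw [if_pos (show ((k : Int) + f) ≠ -1 by omega)]
      rw [PySem.List.slice_from src (show (0 : Int) ≤ (k : Int) + f + 1 from by omega)]
      rw [show ((k : Int) + f + 1).toNat = k + f.toNat + 1 from by omega]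

-- a marker without newline occurring in the joined text occurs in some line
lemma pv_infix_intercalate_exists {M : List Char} {L : List (List Char)} (hM : '\n' ∉ M)
    (hne : L ≠ []) (h : M <:+: List.intercalate ['\n'] L) :
    ∃ x ∈ L, PySem.Chars.isIn M x = true := by
  induction L with
  | nil => exact absurd rfl hne
  | cons a L' ih =>
    by_cases hL : L' = []
    · subst hL
      rw [pv_intercalate_cons, if_pos rfl, List.append_nil] at h
      exact ⟨a, List.mem_cons_self .., (PySem.Chars.isIn_iff_infix M a).2 h⟩
    · rw [pv_intercalate_cons, if_neg hL] at h
      obtain ⟨j, hj⟩ := (PySem.Chars.exists_prefix_drop_iff_isIn M _).2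
        ((PySem.Chars.isIn_iff_infix M _).2 h)
      rcases pv_le_or_lt j a.length with hle | hlt
      · rw [List.drop_append_of_le_length hle] at hj
        exact ⟨a, List.mem_cons_self ..,
          (PySem.Chars.isIn_iff_infix M a).2 (pv_infix_of_prefix_drop (pv_prefix_through_sep hM hj))⟩
      · have hdrop : (a ++ '\n' :: List.intercalate ['\n'] L').drop j
            = (List.intercalate ['\n'] L').drop (j - a.length - 1) := by
          have h2 : a ++ '\n' :: List.intercalate ['\n'] L' = (a ++ ['\n']) ++ List.intercalate ['\n'] L' := by simp
          rw [h2, pv_drop_big _ _ _ (by simp only [List.length_append, List.length_cons, List.length_nil]; omega)]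
          congr 1
          simp only [List.length_append, List.length_cons, List.length_nil]
          omega
        rw [hdrop] at hj
        obtain ⟨x, hx, hx2⟩ := ih hL ((PySem.Chars.exists_prefix_drop_iff_isIn M _).1 ⟨_, hj⟩ |>
          fun hin => (PySem.Chars.isIn_iff_infix M _).1 hin)
        exact ⟨x, List.mem_cons_of_mem _ hx, hx2⟩

lemma pv_TB (M ins : List Char) :
    ∀ L, L ≠ [] → (∀ l ∈ L, '\n' ∉ l) → '\n' ∉ M →
    pvBClean M ins (List.intercalate ['\n'] L) = pvOut (pvRef M ins L) := by
  intro L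
  induction L with
  | nil => intro h; exact absurd rfl h
  | cons l L' ih =>
    intro _ hNL hM
    have hNl : '\n' ∉ l := hNL l (List.mem_cons_self ..)
    by_cases hL' : L' = []
    · -- single line
      subst hL'
      have hS : List.intercalate ['\n'] [l] = l := by
        rw [pv_intercalate_cons, if_pos rfl, List.append_nil]
      rw [hS]
      by_cases hin : PySem.Chars.isIn M l
      · have hne : PySem.Chars.find l M ≠ -1 := pv_isIn_true_find hin
        rw [pv_B_shape M ins l hne]
        rw [pv_rfind_no_newline (fun hm => hNl (List.mem_of_mem_take hm))]
        rw [if_pos rfl]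
        rw [(PySem.Chars.find_eq_neg_one_iff _ _).2
          (fun hinf => hNl (List.mem_of_mem_drop (pv_single_infix_iff.1 hinf)))]
        rw [if_pos rfl]
        rw [pvRef, if_pos hin]
        simp [pvOut, pv_intercalate_nil]
      · have hf : PySem.Chars.find l M = -1 := pv_isIn_false_find (by simpa using hin)
        simp only [pvBClean]
        rw [if_pos hf, pvRef, if_neg hin]
        rfl
    · -- at least two lines
      have hS : List.intercalate ['\n'] (l :: L') = l ++ '\n' :: List.intercalate ['\n'] L' := by
        rw [pv_intercalate_cons, if_neg hL']
      rw [hS]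
      set S' := List.intercalate ['\n'] L' with hS'
      have happ : ∀ j : Nat, (l ++ '\n' :: S').drop (l.length + 1 + j) = S'.drop j := by
        intro j
        have h2 : l ++ '\n' :: S' = (l ++ ['\n']) ++ S' := by simp
        rw [h2, pv_drop_big _ _ _ (by simp only [List.length_append, List.length_cons, List.length_nil]; omega)]
        congr 1
        simp only [List.length_append, List.length_cons, List.length_nil]
        omega
      have happT : ∀ j : Nat, (l ++ '\n' :: S').take (l.length + 1 + j) = l ++ '\n' :: S'.take j := by
        intro j
        have h2 : l ++ '\n' :: S' = (l ++ ['\n']) ++ S' := by simp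
        rw [h2, pv_take_big _ _ _ (by simp only [List.length_append, List.length_cons, List.length_nil]; omega),
          show l.length + 1 + j - (l ++ ['\n']).length = j from by
            simp only [List.length_append, List.length_cons, List.length_nil]; omega]
        simp
      by_cases hin : PySem.Chars.isIn M l
      · -- marker in the first line
        have hfl : PySem.Chars.find (l ++ '\n' :: S') M = PySem.Chars.find l M :=
          pv_find_append_left hM hin
        have hne0 : PySem.Chars.find l M ≠ -1 := pv_isIn_true_find hin
        have hnn : 0 ≤ PySem.Chars.find l M := by
          have := PySem.Chars.neg_one_le_find l M; omega
        have hle : PySem.Chars.find l M ≤ l.length := PySem.Chars.find_le_length l M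
        set k := (PySem.Chars.find l M).toNat with hk
        have hkle : k ≤ l.length := by omega
        rw [pv_B_shape M ins _ (by rw [hfl]; exact hne0)]
        rw [hfl]
        rw [show (PySem.Chars.find l M).toNat = k from rfl]
        rw [List.take_append_of_le_length hkle]
        rw [pv_rfind_no_newline (fun hm => hNl (List.mem_of_mem_take hm))]
        rw [if_pos rfl]
        rw [List.drop_append_of_le_length hkle]
        have hfindnl : PySem.Chars.find (l.drop k ++ '\n' :: S') ['\n'] = ((l.length - k : Nat) : Int) := by
          apply pv_find_eq
          · rw [show l.length - k = (l.drop k).length from by simp, List.drop_left]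
            exact ⟨S', rfl⟩
          · intro j hj hpre
            rw [pv_single_prefix_iff, List.head?_drop] at hpre
            rw [List.getElem?_append_left (by simp; omega)] at hpre
            exact hNl (List.mem_of_mem_drop (List.mem_of_getElem? hpre))
        rw [hfindnl]
        rw [if_neg (by omega)]
        rw [show ((l.length - k : Nat) : Int).toNat = l.length - k from by omega]
        rw [show k + (l.length - k) + 1 = l.length + 1 + 0 from by omega, happ 0, List.drop_zero]
        rw [pvRef, if_pos hin]
        simp [pvOut, ← hS']
      · -- marker not in the first line
        have hinF : PySem.Chars.isIn M l = false := by simpa using hin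
        have hfd := pv_find_append_right (v := S') hM hinF
        by_cases hv : PySem.Chars.find S' M = -1
        · rw [if_pos hv] at hfd
          simp only [pvBClean]
          rw [hfd, if_pos rfl]
          have hnone : pvRef M ins L' = none := by
            rw [pv_ref_none_iff, pv_findLine_all_false]
            intro x hx
            cases hh : PySem.Chars.isIn M x with
            | false => rfl
            | true =>
              exfalso
              have hinf := (PySem.Chars.isIn_iff_infix M x).1 hh
              have hxs := pv_mem_infix_intercalate hx
              exact (PySem.Chars.find_eq_neg_one_iff S' M).1 hv (hinf.trans hxs)
          rw [pvRef, if_neg hin, hnone]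
          rfl
        · rw [if_neg hv] at hfd
          have hvnn : 0 ≤ PySem.Chars.find S' M := by
            have := PySem.Chars.neg_one_le_find S' M; omega
          set k' := (PySem.Chars.find S' M).toNat with hk'
          have hk'le : k' ≤ S'.length := by
            have := PySem.Chars.find_le_length S' M; omega
          have hSne : PySem.Chars.find (l ++ '\n' :: S') M ≠ -1 := by
            rw [hfd]; omega
          rw [pv_B_shape M ins _ hSne]
          have htN : (PySem.Chars.find (l ++ '\n' :: S') M).toNat = l.length + 1 + k' := by
            rw [hfd]; omega
          rw [htN, happT k', happ k']
          rw [pv_rfind_append_newline l (S'.take k')]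
          set r' := PySem.Chars.rfind (S'.take k') ['\n'] with hr'
          set f := PySem.Chars.find (S'.drop k') ['\n'] with hf
          have hfge : -1 ≤ f := PySem.Chars.neg_one_le_find _ _
          -- shape of the B value one level down
          have hfound' : pvRef M ins L' ≠ none := by
            intro hnone
            have hall := pv_findLine_all_false.1 (pv_ref_none_iff.1 hnone)
            obtain ⟨x, hx, hx2⟩ := pv_infix_intercalate_exists hM hL'
              ((PySem.Chars.find_ne_neg_one_iff S' M).1 hv)
            rw [hall x hx] at hx2
            exact absurd hx2 (by simp)
          obtain ⟨t, ht⟩ := Option.ne_none_iff_exists'.1 hfound'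
          have hB' := ih hL' (fun x hx => hNL x (List.mem_cons_of_mem _ hx)) hM
          rw [pv_B_shape M ins S' (by omega), ht] at hB'
          rw [show (PySem.Chars.find S' M).toNat = k' from rfl, ← hr', ← hf] at hB'
          have htval : t = (if r' = -1 then [] else S'.take r'.toNat) ++ '\n' :: ins ++ '\n' ::
              (if f = -1 then [] else S'.drop (k' + f.toNat + 1)) :=
            (pv_ofList_inj hB').symm
          -- r' = -1 iff the marker sits in the first line of L'
          obtain ⟨h0, L'', rfl⟩ : ∃ h0 L'', L' = h0 :: L'' := by
            cases L' with
            | nil => exact absurd rfl hL'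
            | cons a b => exact ⟨a, b, rfl⟩
          have hNh0 : '\n' ∉ h0 := hNL h0 (List.mem_cons_of_mem _ (List.mem_cons_self ..))
          have hriff : r' = -1 ↔ PySem.Chars.isIn M h0 = true := by
            constructor
            · intro hrc
              by_contra hz
              have hzF : PySem.Chars.isIn M h0 = false := by simpa using hz
              have hL'' : L'' ≠ [] := by
                intro hLe
                subst hLe
                have : S' = h0 := by
                  simp [hS', pv_intercalate_cons]
                rw [this] at hv
                exact hv (pv_isIn_false_find hzF)
              have hS'' : S' = h0 ++ '\n' :: List.intercalate ['\n'] L'' := by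
                rw [hS', pv_intercalate_cons, if_neg hL'']
              have hfd2 := pv_find_append_right (v := List.intercalate ['\n'] L'') hM hzF
              rw [← hS''] at hfd2
              have hk'big : h0.length + 1 ≤ k' := by
                by_cases hvv : PySem.Chars.find (List.intercalate ['\n'] L'') M = -1
                · rw [if_pos hvv] at hfd2; exact absurd hfd2 hv
                · rw [if_neg hvv] at hfd2
                  have := PySem.Chars.neg_one_le_find (List.intercalate ['\n'] L'') M
                  omega
              have hmem : '\n' ∈ S'.take k' := by
                rw [hS'']
                have h2 : h0 ++ '\n' :: List.intercalate ['\n'] L''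
                    = (h0 ++ ['\n']) ++ List.intercalate ['\n'] L'' := by simp
                rw [h2, pv_take_big _ _ _ (by simp only [List.length_append, List.length_cons, List.length_nil]; omega)]
                simp
              exact pv_rfind_mem_ne hmem hrc
            · intro hz
              have hfeq : PySem.Chars.find S' M = PySem.Chars.find h0 M := by
                by_cases hL'' : L'' = []
                · subst hL''
                  simp [hS', pv_intercalate_cons]
                · rw [hS', pv_intercalate_cons, if_neg hL'']
                  exact pv_find_append_left hM hz
              have hkh : k' ≤ h0.length := by
                rw [hk', hfeq]
                have := PySem.Chars.find_le_length h0 M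
                have := PySem.Chars.neg_one_le_find h0 M
                omega
              have htk : S'.take k' = h0.take k' := by
                by_cases hL'' : L'' = []
                · subst hL''
                  simp [hS', pv_intercalate_cons]
                · rw [hS', pv_intercalate_cons, if_neg hL'']
                  exact List.take_append_of_le_length hkh
              rw [hr', htk]
              exact pv_rfind_no_newline (fun hm => hNh0 (List.mem_of_mem_take hm))
          rw [pvRef, if_neg hin, ht]
          simp only [List.headI]
          rw [htval]
          by_cases hrc : r' = -1
          · rw [if_pos hrc, if_pos (hriff.1 hrc), if_pos hrc]
            rw [if_neg (show ¬ ((l.length : Int) = -1) by omega)]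
            rw [show ((l.length : Int)).toNat = l.length from by omega]
            rw [List.take_left]
            by_cases hfc : f = -1
            · rw [if_pos hfc, if_pos hfc]
              simp [pvOut]
            · rw [if_neg hfc, if_neg hfc]
              rw [show l.length + 1 + k' + f.toNat + 1 = l.length + 1 + (k' + f.toNat + 1) from by omega,
                happ (k' + f.toNat + 1)]
              simp [pvOut]
          · rw [if_neg (fun hz => hrc (hriff.2 hz)), if_neg hrc, if_neg hrc]
            have hr'0 : 0 ≤ r' := by
              by_contra hneg
              obtain ⟨a, _, _, _⟩ := pv_rfind_sound (hr' ▸ hrc)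
              omega
            rw [if_neg (show ¬ ((l.length : Int) + 1 + r' = -1) by omega)]
            rw [show ((l.length : Int) + 1 + r').toNat = l.length + 1 + r'.toNat from by omega]
            rw [happT r'.toNat]
            by_cases hfc : f = -1
            · rw [if_pos hfc, if_pos hfc]
              simp [pvOut]
            · rw [if_neg hfc, if_neg hfc]
              rw [show l.length + 1 + k' + f.toNat + 1 = l.length + 1 + (k' + f.toNat + 1) from by omega,
                happ (k' + f.toNat + 1)]
              simp [pvOut]

-- ===== VERDICT (by name: the statement is the Claim_ definition above) =====
theorem insertToTextString_spec : Claim_equal_insertToTextString := by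
  intro e s ins hdom hpre
  unfold Spec_insertToTextString
  rw [pv_portA_eq, pv_portB_eq]
  by_cases hfind : PySem.Chars.isIn (pvMarker e) s.toList = false
  · -- marker nowhere in source: both "no place to insert"
    have hf := pv_isIn_false_find hfind
    have hB : pvBClean (pvMarker e) ins.toList s.toList = "no place to insert" := by
      unfold pvBClean
      rw [if_pos hf]
    have hnone : pvRef (pvMarker e) ins.toList (pvSplit s.toList) = none := by
      rw [pv_ref_none_iff, pv_findLine_all_false]
      intro l hl
      by_contra hc
      have hl2 : PySem.Chars.isIn (pvMarker e) l = true := by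
        cases hh : PySem.Chars.isIn (pvMarker e) l
        · exact absurd hh hc
        · rfl
      have hinf : pvMarker e <:+: l := (PySem.Chars.isIn_iff_infix _ _).1 hl2
      have hls : l <:+: s.toList := by
        have := pv_mem_infix_intercalate hl
        rwa [pv_intercalate_pvSplit] at this
      have : pvMarker e <:+: s.toList := hinf.trans hls
      rw [PySem.Chars.isIn_eq_false_iff] at hfind
      exact hfind this
    rw [pv_TA, hnone, hB]
    rfl
  · -- marker occurs: Pre_ gives newline-free entryPoint
    have hM : '\n' ∉ pvMarker e := by
      rcases hpre with hp | hp
      · intro hmem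
        rw [PySem.Chars.isIn_eq_false_iff] at hp
        apply hp
        rw [pv_single_infix_iff]
        unfold pvMarker at hmem
        simp only [List.mem_append] at hmem
        rcases hmem with (hh | hh) | hh
        · exact absurd hh (by decide)
        · exact hh
        · exact absurd hh (by decide)
      · exact absurd hp hfind
    rw [pv_TA]
    have hTB := pv_TB (pvMarker e) ins.toList (pvSplit s.toList) (pv_pvSplit_ne_nil _)
      (pv_pvSplit_newline_free _) hM
    rw [pv_intercalate_pvSplit] at hTB
    exact hTB.symm
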